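-- pv_equiv track=rewrite | github.com/AlibabaResearch/DAMO-ConvAI | FlowBench/utils/eval_utils.py | find_last_common_index
-- ===== SOURCE A (Python) =====
-- def find_last_common_index(a, b):
--     last_index = -1
--     j = 0
--     for i, item in enumerate(a):
--         while j < len(b) and b[j] != item:
--             j += 1
--         if j < len(b):
--             last_index = i
--         else:
--             break
--         j += 1
--     return last_index
-- ===== SOURCE B (Python) =====
-- def find_last_common_index(a, b):
--     last_index = -1
--     k = 0
--     for x in b:
--         if k < len(a) and a[k] == x:
--             last_index = k
--             k += 1
--     return last_index
-- ===== Notes on version B (the rewrite author's own statement) =====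
-- stated objective: simpler
-- what changed: Replaces the loop over a with a nested while-scan over b (and a break) by a single flat pass over b maintaining a cursor into a, with no inner loop or break.
import Mathlib
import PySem

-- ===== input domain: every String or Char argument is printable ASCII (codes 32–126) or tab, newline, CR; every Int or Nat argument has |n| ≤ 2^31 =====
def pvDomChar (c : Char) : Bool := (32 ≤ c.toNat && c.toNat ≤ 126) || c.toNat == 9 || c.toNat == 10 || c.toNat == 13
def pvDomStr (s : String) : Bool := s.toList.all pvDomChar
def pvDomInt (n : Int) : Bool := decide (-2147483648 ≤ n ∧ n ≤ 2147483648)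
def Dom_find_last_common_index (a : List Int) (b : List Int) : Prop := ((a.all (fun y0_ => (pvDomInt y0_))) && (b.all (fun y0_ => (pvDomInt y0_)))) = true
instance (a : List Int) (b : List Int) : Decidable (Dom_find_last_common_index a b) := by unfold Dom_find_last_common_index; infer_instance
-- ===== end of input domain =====

-- B replaces A's loop-over-a-with-inner-while-scan-of-b by one flat pass over b with a cursor into a (simpler decomposition, same greedy result).

-- ===== PORT A =====
-- the inner `while j < len(b) and b[j] != item: j += 1` loop
def pvWhileA (b : List Int) (item : Int) (j : Nat) : Nat :=
  if h : j < b.length then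
    if b[j] ≠ item then pvWhileA b item (j + 1) else j
  else j
termination_by b.length - j

-- the `for i, item in enumerate(a)` loop (with its break)
def pvLoopA (b : List Int) : List Int → Int → Nat → Int → Int
  | [], _, _, last => last
  | item :: rest, i, j, last =>
    let j' := pvWhileA b item j
    if j' < b.length then pvLoopA b rest (i + 1) (j' + 1) i
    else last

def find_last_common_index (a : List Int) (b : List Int) : Int :=
  pvLoopA b a 0 0 (-1)

-- ===== PORT B =====
-- the single `for x in b` loop with cursor k into a
def pvLoopB (a : List Int) : List Int → Nat → Int → Int
  | [], _, last => last
  | x :: rest, k, last =>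
    if h : k < a.length then
      if a[k] = x then pvLoopB a rest (k + 1) (k : Int)
      else pvLoopB a rest k last
    else pvLoopB a rest k last

def find_last_common_index_alt (a : List Int) (b : List Int) : Int :=
  pvLoopB a b 0 (-1)

-- ===== PRECONDITION & SPEC =====
def Spec_find_last_common_index (a : List Int) (b : List Int) (out : Int) : Prop := out = find_last_common_index_alt a b
instance (a : List Int) (b : List Int) (out : Int) : Decidable (Spec_find_last_common_index a b out) := by unfold Spec_find_last_common_index; infer_instance

-- ===== CLAIM (what is proved, stated in full; the proofs are below) =====
def Claim_equal_find_last_common_index : Prop := ∀ (a : List Int) (b : List Int), Dom_find_last_common_index a b → Spec_find_last_common_index a b (find_last_common_index a b)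

-- ===== LEMMAS AND PROOFS =====

-- drop the longest prefix of elements ≠ item
def pvSkip (item : Int) : List Int → List Int
  | [] => []
  | y :: ys => if y = item then y :: ys else pvSkip item ys

-- number of elements of a greedily matched (in order) against b
def pvMC : List Int → List Int → Nat
  | [], _ => 0
  | x :: a', b =>
    match pvSkip x b with
    | [] => 0
    | _ :: b' => pvMC a' b' + 1

lemma pvMC_nil (l : List Int) : pvMC l [] = 0 := by
  cases l <;> simp [pvMC, pvSkip]

lemma pvWhileA_drop (b : List Int) (item : Int) :
    ∀ n j, b.length - j = n → j ≤ b.length →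
      b.drop (pvWhileA b item j) = pvSkip item (b.drop j) ∧ pvWhileA b item j ≤ b.length := by
  intro n
  induction n with
  | zero =>
    intro j hn hj
    have hj' : j = b.length := by omega
    rw [pvWhileA]
    simp [hj', pvSkip]
  | succ m ih =>
    intro j hn hj
    have hlt : j < b.length := by omega
    have hcons : b[j] :: b.drop (j + 1) = b.drop j := List.getElem_cons_drop hlt
    rw [pvWhileA]
    simp only [hlt, dif_pos]
    by_cases heq : b[j] = item
    · simp only [heq, ne_eq, not_true_eq_false, ite_false]
      constructor
      · rw [← hcons, heq, pvSkip]; simp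
      · omega
    · simp only [ne_eq, heq, not_false_eq_true, if_pos]
      have := ih (j + 1) (by omega) (by omega)
      refine ⟨?_, this.2⟩
      rw [this.1, ← hcons, pvSkip]
      simp [heq]

lemma pvLoopA_eq (b : List Int) :
    ∀ (rest : List Int) (j : Nat) (i : Int), j ≤ b.length →
      pvLoopA b rest i j (i - 1) = i + (pvMC rest (b.drop j) : Int) - 1 := by
  intro rest
  induction rest with
  | nil => intro j i hj; simp [pvLoopA, pvMC]
  | cons item rest ih =>
    intro j i hj
    obtain ⟨hdrop, hle⟩ := pvWhileA_drop b item (b.length - j) j rfl hj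
    simp only [pvLoopA]
    by_cases hlt : pvWhileA b item j < b.length
    · have hne : b.drop (pvWhileA b item j) ≠ [] := by
        intro hnil
        have := List.drop_eq_nil_iff.mp hnil
        omega
      obtain ⟨y, ys, hcons⟩ := List.exists_cons_of_ne_nil hne
      have hcons2 : b[pvWhileA b item j] :: b.drop (pvWhileA b item j + 1)
          = b.drop (pvWhileA b item j) := List.getElem_cons_drop hlt
      have hys : ys = b.drop (pvWhileA b item j + 1) := by
        rw [← hcons2] at hcons; exact ((List.cons.injEq _ _ _ _ ▸ hcons).2).symm
      have hskip : pvSkip item (b.drop j) = y :: ys := by rw [← hdrop, hcons]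
      have hmc : pvMC (item :: rest) (b.drop j) = pvMC rest ys + 1 := by
        simp [pvMC, hskip]
      have hih := ih (pvWhileA b item j + 1) (i + 1) (by omega)
      simp only [hlt, if_pos]
      have hstep : pvLoopA b rest (i + 1) (pvWhileA b item j + 1) i
          = pvLoopA b rest (i + 1) (pvWhileA b item j + 1) (i + 1 - 1) := by norm_num
      rw [hstep, hih, hmc, ← hys]
      push_cast; ring
    · have hj' : pvWhileA b item j = b.length := by omega
      have : b.drop (pvWhileA b item j) = [] := by simp [hj']
      have hskip : pvSkip item (b.drop j) = [] := by rw [← hdrop, this]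
      have hmc : pvMC (item :: rest) (b.drop j) = 0 := by simp [pvMC, hskip]
      simp [hlt, hmc]

lemma pvLoopB_eq (a : List Int) :
    ∀ (b : List Int) (k : Nat),
      pvLoopB a b k ((k : Int) - 1) = k + (pvMC (a.drop k) b : Int) - 1 := by
  intro b
  induction b with
  | nil => intro k; simp [pvLoopB, pvMC_nil]
  | cons x rest ih =>
    intro k
    simp only [pvLoopB]
    by_cases hk : k < a.length
    · have hcons : a[k] :: a.drop (k + 1) = a.drop k := List.getElem_cons_drop hk
      by_cases hx : a[k] = x
      · simp only [hk, dif_pos, if_pos hx]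
        have : (k : Int) = ((k + 1 : Nat) : Int) - 1 := by push_cast; ring
        rw [this, ih (k + 1)]
        have hmc : pvMC (a.drop k) (x :: rest) = pvMC (a.drop (k + 1)) rest + 1 := by
          rw [← hcons, pvMC, pvSkip]
          simp [hx]
        rw [hmc]; push_cast; ring
      · simp only [hk, dif_pos, if_neg hx]
        rw [ih k]
        have hmc : pvMC (a.drop k) (x :: rest) = pvMC (a.drop k) rest := by
          conv_lhs => rw [← hcons, pvMC, pvSkip]
          rw [if_neg (fun h => hx h.symm), ← hcons, pvMC]
        rw [hmc]
    · have hdrop : a.drop k = [] := List.drop_eq_nil_iff.mpr (Nat.le_of_not_lt hk)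
      simp only [dif_neg hk]
      rw [ih k, hdrop]
      simp [pvMC]
-- ===== VERDICT (by name: the statement is the Claim_ definition above) =====
theorem find_last_common_index_spec : Claim_equal_find_last_common_index := by
  intro a b _
  unfold Spec_find_last_common_index find_last_common_index find_last_common_index_alt
  have hA := pvLoopA_eq b a 0 0 (by omega)
  have hB := pvLoopB_eq a b 0
  simp only [List.drop_zero] at hA hB
  norm_num at hA hB
  rw [hA, hB]
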